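-- pv_equiv track=rewrite | github.com/ultraevs/GagarinHack | python-backend/cv/nn/reader.py | combine_elements
-- ===== SOURCE A (Python) =====
-- def combine_elements(combiner_layout, text_list, layout_key):
--     rules = combiner_layout.get(layout_key, [])
--
--     combined_result = text_list.copy()
--
--     processed_indices = set()
--
--     for indexes, separator in rules:
--         filtered_indexes = [i for i in indexes if i not in processed_indices and i < len(combined_result)]
--
--         if not filtered_indexes:
--             continue
--
--         combined_text = separator.join(combined_result[i] for i in filtered_indexes)
--         combined_result[filtered_indexes[0]] = combined_text
--
--         for index in filtered_indexes[1:]: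
--             processed_indices.add(index)
--     for index in sorted(processed_indices, reverse=True):
--         del combined_result[index]
--
--     return combined_result
-- ===== SOURCE B (Python) =====
-- def combine_elements(combiner_layout, text_list, layout_key):
--     rules = combiner_layout.get(layout_key, [])
--     n = len(text_list)
--     tree = {}            # slot -> join tree (separator, [child trees]); an int is a leaf slot
--     alive = [True] * n
--     for indexes, separator in rules:
--         srcs = [i for i in indexes if 0 <= i < n and alive[i]]
--         if srcs:
--             tree[srcs[0]] = (separator, [tree.get(i, i) for i in srcs])
--             for i in srcs[1:]:
--                 alive[i] = False
--
--     def render(t):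
--         if isinstance(t, int):
--             return text_list[t]
--         sep, kids = t
--         return sep.join(render(k) for k in kids)
--
--     return [render(tree.get(j, j)) for j in range(n) if alive[j]]
-- ===== Notes on version B (the rewrite author's own statement) =====
-- stated objective: alternative
-- what changed: B does no string work and no list mutation during the rule loop: it builds a join tree (separator + child subtrees) per target slot and a boolean alive mask, then renders each surviving slot's tree recursively in one final pass, instead of A's eager in-place joins plus a sorted-descending loop of repeated list del; …
-- outside the precondition, e.g. on combine_elements({'k': [([0, -1], '-')]}, ['a', 'b'], 'k'): A returns ['a-b'], B returns ['a', 'b']; on combine_elements({'k': [([-5], '-')]}, ['a', 'b'], 'k'): A raises IndexError, B returns ['a', 'b']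
import Mathlib
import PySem

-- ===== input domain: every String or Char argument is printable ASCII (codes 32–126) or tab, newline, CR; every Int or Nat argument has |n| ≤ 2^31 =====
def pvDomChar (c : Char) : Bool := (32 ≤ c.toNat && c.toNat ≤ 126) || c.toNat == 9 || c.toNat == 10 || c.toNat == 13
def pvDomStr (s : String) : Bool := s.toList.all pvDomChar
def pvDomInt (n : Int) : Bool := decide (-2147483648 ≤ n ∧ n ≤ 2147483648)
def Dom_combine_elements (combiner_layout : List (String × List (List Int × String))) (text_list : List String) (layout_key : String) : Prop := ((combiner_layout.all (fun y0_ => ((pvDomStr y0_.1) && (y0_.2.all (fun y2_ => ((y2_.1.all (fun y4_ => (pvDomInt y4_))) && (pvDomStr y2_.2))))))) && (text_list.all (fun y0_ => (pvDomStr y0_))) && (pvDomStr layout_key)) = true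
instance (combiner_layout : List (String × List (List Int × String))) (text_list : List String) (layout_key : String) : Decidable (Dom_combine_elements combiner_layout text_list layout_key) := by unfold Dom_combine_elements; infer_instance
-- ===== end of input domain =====

-- B defers all string work: the rule loop only builds a join tree per target slot and an alive
-- mask, and each surviving slot is rendered once at the end (objective: alternative).

-- ===== PORT A =====
-- one iteration of A's `for indexes, separator in rules` loop over (combined_result, processed_indices)
def pvStepA (st : List String × PySem.Set Int) (rule : List Int × String) : List String × PySem.Set Int :=
  let filtered := rule.1.filter (fun i => !(PySem.Set.contains st.2 i) && decide (i < (st.1.length : Int)))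
  match filtered with
  | [] => st
  | f0 :: rest =>
      let combined := PySem.Str.join rule.2 ((f0 :: rest).map (fun i => (PySem.List.pyGet? st.1 i).getD ""))
      (PySem.List.pySetD st.1 f0 combined, rest.foldl (fun s x => PySem.Set.add s x) st.2)

def combine_elements (combiner_layout : List (String × List (List Int × String))) (text_list : List String) (layout_key : String) : List String :=
  let rules := (PySem.Dict.mk combiner_layout).getD layout_key []
  let st := rules.foldl pvStepA (text_list, PySem.Set.empty)
  (PySem.List.sorted st.2 (fun x => x) true).foldl (fun r i => r.eraseIdx i.toNat) st.1

-- ===== PORT B =====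
-- Source B's join trees: a leaf is an original slot, a node is (separator, children)
mutual
inductive PvTree : Type
  | leaf : Int → PvTree
  | node : String → PvTreeList → PvTree
inductive PvTreeList : Type
  | nil : PvTreeList
  | cons : PvTree → PvTreeList → PvTreeList
end

-- `[tree.get(i, i) for i in srcs]`
def pvTreesOf (d : PySem.Dict Int PvTree) : List Int → PvTreeList
  | [] => .nil
  | i :: is => .cons (d.getD i (.leaf i)) (pvTreesOf d is)

-- Source B's `render`
mutual
def pvRender (tl : List String) : PvTree → String
  | .leaf i => PySem.List.pyGetD tl i ""
  | .node sep kids => PySem.Str.join sep (pvRenderList tl kids)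
def pvRenderList (tl : List String) : PvTreeList → List String
  | .nil => []
  | .cons t ts => pvRender tl t :: pvRenderList tl ts
end

-- one iteration of Source B's rule loop over (tree, alive)
def pvStepB (n : Int) (st : PySem.Dict Int PvTree × List Bool) (rule : List Int × String) : PySem.Dict Int PvTree × List Bool :=
  let srcs := rule.1.filter (fun i => decide (0 ≤ i) && decide (i < n) && ((st.2[i.toNat]?).getD false))
  match srcs with
  | [] => st
  | f0 :: rest =>
      let nd := PvTree.node rule.2 (pvTreesOf st.1 (f0 :: rest))
      (st.1.insert f0 nd, rest.foldl (fun a i => List.set a i.toNat false) st.2)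

def combine_elements_alt (combiner_layout : List (String × List (List Int × String))) (text_list : List String) (layout_key : String) : List String :=
  let rules := (PySem.Dict.mk combiner_layout).getD layout_key []
  let n : Int := text_list.length
  let st := rules.foldl (pvStepB n) (PySem.Dict.empty, List.replicate text_list.length true)
  (PySem.List.pyRange 0 n 1).filterMap (fun j =>
    if (st.2[j.toNat]?).getD false then some (pvRender text_list (st.1.getD j (.leaf j))) else none)

-- ===== PRECONDITION & SPEC =====
-- Pre_ excludes inputs whose selected rules contain a negative index: there A raises IndexError for
-- indexes below -len(text_list), and otherwise its wraparound reads/writes and shifting sequential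
-- deletions give accidental values that B (which ignores out-of-range indexes) does not reproduce.
def Pre_combine_elements (combiner_layout : List (String × List (List Int × String))) (text_list : List String) (layout_key : String) : Prop :=
  ∀ r ∈ (PySem.Dict.mk combiner_layout).getD layout_key ([] : List (List Int × String)), ∀ i ∈ r.1, 0 ≤ i
instance (combiner_layout : List (String × List (List Int × String))) (text_list : List String) (layout_key : String) : Decidable (Pre_combine_elements combiner_layout text_list layout_key) := by unfold Pre_combine_elements; infer_instance

def pvWitness_combine_elements : (List (String × List (List Int × String))) × List String × String :=
  ([("k", [([0, 1], "-")])], ["a", "b"], "k")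

def Spec_combine_elements (combiner_layout : List (String × List (List Int × String))) (text_list : List String) (layout_key : String) (out : List String) : Prop := out = combine_elements_alt combiner_layout text_list layout_key
instance (combiner_layout : List (String × List (List Int × String))) (text_list : List String) (layout_key : String) (out : List String) : Decidable (Spec_combine_elements combiner_layout text_list layout_key out) := by unfold Spec_combine_elements; infer_instance

-- ===== CLAIM (what is proved, stated in full; the proofs are below) =====
def Claim_equal_combine_elements : Prop := ∀ (combiner_layout : List (String × List (List Int × String))) (text_list : List String) (layout_key : String), Dom_combine_elements combiner_layout text_list layout_key → Pre_combine_elements combiner_layout text_list layout_key → Spec_combine_elements combiner_layout text_list layout_key (combine_elements combiner_layout text_list layout_key)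

-- ===== LEMMAS AND PROOFS =====

-- rendering the snapshot trees of a source list = looking each slot's rendered value up
theorem pvRenderList_treesOf (tl : List String) (d : PySem.Dict Int PvTree) (l : List Int) :
    pvRenderList tl (pvTreesOf d l) = l.map (fun i => pvRender tl (d.getD i (.leaf i))) := by
  induction l with
  | nil => rfl
  | cons i is ih => simp [pvTreesOf, pvRenderList, ih]

-- the alive fold preserves length
theorem pvFoldSet_length (al : List Bool) (rest : List Int) :
    (rest.foldl (fun a i => List.set a i.toNat false) al).length = al.length := by
  induction rest generalizing al with
  | nil => rfl
  | cons i is ih => simp [List.foldl_cons, ih]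

-- pointwise value of the alive fold
theorem pvFoldSet_get (al : List Bool) (rest : List Int) (hr : ∀ i ∈ rest, 0 ≤ i) (k : Nat) :
    ((rest.foldl (fun a i => List.set a i.toNat false) al)[k]?).getD false
      = ((al[k]?).getD false && !decide ((k : Int) ∈ rest)) := by
  induction rest generalizing al with
  | nil => simp
  | cons i is ih =>
      rw [List.foldl_cons, ih _ (fun j hj => hr j (List.mem_cons_of_mem _ hj))]
      have hi0 : 0 ≤ i := hr i List.mem_cons_self
      by_cases hk : i.toNat = k
      · have hki : (k : Int) = i := by omega
        have hmem : (k : Int) ∈ i :: is := by rw [hki]; exact List.mem_cons_self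
        have hL : ((List.set al i.toNat false)[k]?).getD false = false := by
          rw [hk, List.getElem?_set]
          by_cases hkl : k < al.length <;> simp [hkl]
        simp [hL, hmem]
      · have hki : ¬ (k : Int) = i := by omega
        simp [hk, hki]

-- the loop invariant tying A's (combined_result, processed) to B's (tree, alive)
def pvInv (tl : List String) (sa : List String × PySem.Set Int) (sb : PySem.Dict Int PvTree × List Bool) : Prop :=
  sa.1.length = tl.length ∧ sb.2.length = tl.length ∧
  (∀ k : Nat, k < tl.length → ((sb.2[k]?).getD false = !decide ((k : Int) ∈ sa.2))) ∧
  (∀ j : Int, 0 ≤ j → j < (tl.length : Int) → (PySem.List.pyGet? sa.1 j).getD "" = pvRender tl (sb.1.getD j (.leaf j))) ∧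
  (∀ x ∈ sa.2, 0 ≤ x ∧ x < (tl.length : Int)) ∧ sa.2.Nodup

theorem pvInv_step (tl : List String) (sa : List String × PySem.Set Int)
    (sb : PySem.Dict Int PvTree × List Bool) (rule : List Int × String)
    (hpre : ∀ i ∈ rule.1, 0 ≤ i) (h : pvInv tl sa sb) :
    pvInv tl (pvStepA sa rule) (pvStepB (tl.length : Int) sb rule) := by
  obtain ⟨hlenA, hlenB, halive, hval, hbd, hnd⟩ := h
  unfold pvStepA pvStepB
  have hfeq : rule.1.filter (fun i => !(PySem.Set.contains sa.2 i) && decide (i < (sa.1.length : Int)))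
      = rule.1.filter (fun i => decide (0 ≤ i) && decide (i < (tl.length : Int)) && ((sb.2[i.toNat]?).getD false)) := by
    apply List.filter_congr
    intro i hi
    have hi0 : 0 ≤ i := hpre i hi
    rw [hlenA]
    by_cases hn : i < (tl.length : Int)
    · have hk : i.toNat < tl.length := by omega
      have := halive i.toNat hk
      have hcast : ((i.toNat : Nat) : Int) = i := by omega
      rw [hcast] at this
      rw [this]
      by_cases hm : i ∈ sa.2
      · simp [hn, hi0, hm]
      · have hc : PySem.Set.contains sa.2 i = false := by
          cases hcc : PySem.Set.contains sa.2 i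
          · rfl
          · exact absurd ((PySem.Set.contains_iff sa.2 i).mp hcc) hm
        simp [hn, hi0, hm]
    · simp [hn]
  rw [← hfeq]
  cases hF : rule.1.filter (fun i => !(PySem.Set.contains sa.2 i) && decide (i < (sa.1.length : Int))) with
  | nil => exact ⟨hlenA, hlenB, halive, hval, hbd, hnd⟩
  | cons f0 rest =>
      dsimp only
      have hmemF : ∀ i ∈ (f0 :: rest), i ∈ rule.1 ∧ i ∉ sa.2 ∧ i < (tl.length : Int) := by
        intro i hi
        rw [← hF] at hi
        have h1 := List.mem_filter.mp hi
        refine ⟨h1.1, ?_, ?_⟩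
        · have h2 := h1.2
          simp only [Bool.and_eq_true, Bool.not_eq_true'] at h2
          intro hm
          rw [(PySem.Set.contains_iff sa.2 i).mpr hm] at h2
          simp at h2
        · have h2 := h1.2
          simp only [Bool.and_eq_true, decide_eq_true_eq] at h2
          rw [hlenA] at h2
          exact h2.2
      have hcomb : (f0 :: rest).map (fun i => (PySem.List.pyGet? sa.1 i).getD "")
          = (f0 :: rest).map (fun i => pvRender tl (sb.1.getD i (.leaf i))) := by
        apply List.map_congr_left
        intro i hi
        have h1 := hmemF i hi
        exact hval i (hpre i h1.1) h1.2.2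
      have hrender : PySem.Str.join rule.2 ((f0 :: rest).map (fun i => (PySem.List.pyGet? sa.1 i).getD ""))
          = pvRender tl (PvTree.node rule.2 (pvTreesOf sb.1 (f0 :: rest))) := by
        rw [hcomb, pvRender, pvRenderList_treesOf]
      set c := PySem.Str.join rule.2 ((f0 :: rest).map (fun i => (PySem.List.pyGet? sa.1 i).getD "")) with hc
      have hf00 : 0 ≤ f0 := hpre f0 (hmemF f0 List.mem_cons_self).1
      have hf0n : f0 < (tl.length : Int) := (hmemF f0 List.mem_cons_self).2.2
      have hrest0 : ∀ i ∈ rest, 0 ≤ i := fun i hi => hpre i (hmemF i (List.mem_cons_of_mem _ hi)).1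
      have hfoldeq : rest.foldl (fun s x => PySem.Set.add s x) sa.2 = PySem.Set.update sa.2 rest := rfl
      refine ⟨?_, ?_, ?_, ?_, ?_, ?_⟩
      · rw [PySem.List.length_pySetD]; exact hlenA
      · rw [pvFoldSet_length]; exact hlenB
      · intro k hk
        rw [pvFoldSet_get _ _ hrest0, halive k hk, hfoldeq]
        by_cases hm : (k : Int) ∈ PySem.Set.update sa.2 rest
        · rcases (PySem.Set.mem_update _ _ _).mp hm with hm' | hm'
          · simp [hm, hm']
          · simp [hm, hm']
        · have h1 : (k : Int) ∉ sa.2 := fun hc' => hm ((PySem.Set.mem_update _ _ _).mpr (Or.inl hc'))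
          have h2 : (k : Int) ∉ rest := fun hc' => hm ((PySem.Set.mem_update _ _ _).mpr (Or.inr hc'))
          simp [hm, h1, h2]
      · intro j hj0 hjn
        dsimp only
        have hL : (PySem.List.pyGet? (PySem.List.pySetD sa.1 f0 c) j).getD ""
            = PySem.List.pyGetD (PySem.List.pySetD sa.1 f0 c) j "" := rfl
        have hf0cast : f0 = ((f0.toNat : Nat) : Int) := by omega
        have hjcast : j = ((j.toNat : Nat) : Int) := by omega
        rw [hL, hf0cast, hjcast, PySem.List.pyGetD_pySetD_natCast, PySem.Dict.getD_insert]
        · by_cases hjf : j.toNat = f0.toNat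
          · rw [if_pos hjf, if_pos (show ((j.toNat : Nat) : Int) = ((f0.toNat : Nat) : Int) by omega)]
            rw [← hf0cast]
            exact hrender
          · rw [if_neg hjf, if_neg (show ¬ ((j.toNat : Nat) : Int) = ((f0.toNat : Nat) : Int) by omega)]
            exact hval _ (by omega) (by omega)
        · omega
      · intro x hx
        rw [hfoldeq, PySem.Set.mem_update] at hx
        rcases hx with hx | hx
        · exact hbd x hx
        · have h1 := hmemF x (List.mem_cons_of_mem _ hx)
          exact ⟨hpre x h1.1, h1.2.2⟩
      · rw [hfoldeq]
        exact PySem.Set.nodup_update _ _ hnd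

theorem pvInv_fold (tl : List String) (rules : List (List Int × String))
    (hpre : ∀ r ∈ rules, ∀ i ∈ r.1, 0 ≤ i) (sa : List String × PySem.Set Int)
    (sb : PySem.Dict Int PvTree × List Bool) (h : pvInv tl sa sb) :
    pvInv tl (rules.foldl pvStepA sa) (rules.foldl (pvStepB (tl.length : Int)) sb) := by
  induction rules generalizing sa sb with
  | nil => exact h
  | cons r rs ih =>
      exact ih (fun r hr => hpre r (List.mem_cons_of_mem _ hr)) _ _
        (pvInv_step tl sa sb r (hpre r List.mem_cons_self) h)

-- reading every position of a list back in order reproduces it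
theorem pvFilterMap_range_get {α : Type} (xs : List α) :
    (List.range xs.length).filterMap (fun k => xs[k]?) = xs := by
  induction xs using List.reverseRecOn with
  | nil => simp
  | append_singleton ys y ih =>
      rw [List.length_append, List.length_singleton, List.range_succ, List.filterMap_append]
      have h1 : (List.range ys.length).filterMap (fun k => (ys ++ [y])[k]?) = ys := by
        have h2 : (List.range ys.length).filterMap (fun k => (ys ++ [y])[k]?)
            = (List.range ys.length).filterMap (fun k => ys[k]?) :=
          List.filterMap_congr (fun k hk => List.getElem?_append_left (List.mem_range.mp hk))
        rw [h2, ih]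
      rw [h1]
      simp

-- deleting a strictly-descending list of in-range positions = keeping the other positions
theorem pvEraseIdx_foldl {α : Type} (xs : List α) (ds : List Nat)
    (hd : ds.Pairwise (· > ·)) (hlt : ∀ d ∈ ds, d < xs.length) :
    ds.foldl (fun r i => r.eraseIdx i) xs
      = (List.range xs.length).filterMap (fun k => if k ∈ ds then none else xs[k]?) := by
  induction ds generalizing xs with
  | nil =>
      simp only [List.foldl_nil, List.not_mem_nil, if_false]
      exact (pvFilterMap_range_get xs).symm
  | cons d rest ih =>
      have hdlt : d < xs.length := hlt d List.mem_cons_self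
      have hpc := List.pairwise_cons.mp hd
      have hrd : ∀ e ∈ rest, e < d := hpc.1
      have hlen : (xs.eraseIdx d).length = xs.length - 1 := by
        rw [List.length_eraseIdx]; simp [hdlt]
      rw [List.foldl_cons, ih (xs.eraseIdx d) hpc.2
          (fun e he => by rw [hlen]; have := hrd e he; omega)]
      have e1 : List.range (xs.eraseIdx d).length
          = List.range d ++ (List.range (xs.length - 1 - d)).map (fun j => d + j) := by
        rw [← List.range_add, hlen]; congr 1; omega
      have e2 : List.range xs.length
          = (List.range d ++ [d]) ++ (List.range (xs.length - 1 - d)).map (fun j => (d + 1) + j) := by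
        rw [← List.range_succ, ← List.range_add]; congr 1; omega
      have hfd : List.filterMap (fun k => if k ∈ d :: rest then none else xs[k]?) [d] = [] := by
        simp
      rw [e1, e2, List.filterMap_append, List.filterMap_append, List.filterMap_append, hfd,
          List.append_nil, List.filterMap_map, List.filterMap_map]
      congr 1
      · apply List.filterMap_congr
        intro k hk
        have hkd : k < d := List.mem_range.mp hk
        by_cases hm : k ∈ rest
        · rw [if_pos hm, if_pos (List.mem_cons_of_mem _ hm)]
        · rw [if_neg hm, if_neg (by
            intro hc
            rcases List.mem_cons.mp hc with hc | hc
            · omega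
            · exact hm hc)]
          rw [List.getElem?_eraseIdx, if_pos hkd]
      · apply List.filterMap_congr
        intro j _
        simp only [Function.comp]
        have h1 : d + j ∉ rest := fun hc => by have := hrd _ hc; omega
        have h2 : d + 1 + j ∉ d :: rest := by
          intro hc
          rcases List.mem_cons.mp hc with hc | hc
          · omega
          · have := hrd _ hc; omega
        rw [if_neg h1, if_neg h2, List.getElem?_eraseIdx, if_neg (by omega)]
        congr 1
        omega

-- ===== VERDICT (by name: the statement is the Claim_ definition above) =====
theorem combine_elements_spec : Claim_equal_combine_elements := by
  unfold Claim_equal_combine_elements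
  intro cl tl key _hdom hpre
  unfold Pre_combine_elements at hpre
  unfold Spec_combine_elements combine_elements combine_elements_alt
  simp only []
  set rules := (PySem.Dict.mk cl).getD key ([] : List (List Int × String)) with hrules
  have h0 : pvInv tl (tl, PySem.Set.empty) (PySem.Dict.empty, List.replicate tl.length true) := by
    refine ⟨rfl, List.length_replicate, ?_, ?_, ?_, ?_⟩
    · intro k hk
      rw [List.getElem?_replicate, if_pos hk]
      simp
    · intro j hj0 hjn
      rw [PySem.Dict.getD_empty, pvRender]
      rfl
    · intro x hx
      cases hx
    · exact List.nodup_nil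
  have hI := pvInv_fold tl rules hpre (tl, PySem.Set.empty) (PySem.Dict.empty, List.replicate tl.length true) h0
  set stA := rules.foldl pvStepA (tl, PySem.Set.empty) with hstA
  set stB := rules.foldl (pvStepB (tl.length : Int)) (PySem.Dict.empty, List.replicate tl.length true) with hstB
  obtain ⟨hlenA, hlenB, halive, hval, hbd, hnd⟩ := hI
  set ds := PySem.List.sorted stA.2 (fun x => x) true with hds
  have hdsmem : ∀ x ∈ ds, 0 ≤ x ∧ x < (tl.length : Int) := fun x hx =>
    hbd x ((PySem.List.mem_sorted _ _ _ x).mp hx)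
  have hdsnd : ds.Pairwise (fun a b => a ≠ b) :=
    (List.Perm.nodup_iff (PySem.List.sorted_perm stA.2 (fun x => x) true)).mpr hnd
  have hdsgt : ds.Pairwise (fun a b => b < a) := by
    refine ((PySem.List.sorted_pairwise_rev stA.2 (fun x => x)).and hdsnd).imp ?_
    rintro a b ⟨h1, h2⟩
    exact lt_of_le_of_ne h1 (fun hba => h2 hba.symm)
  rw [← List.foldl_map (f := Int.toNat) (g := fun (r : List String) (i : Nat) => r.eraseIdx i)]
  have hpair : (ds.map Int.toNat).Pairwise (· > ·) := by
    rw [List.pairwise_map]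
    refine hdsgt.imp_of_mem ?_
    intro a b ha hb hlt2
    have h1 := hdsmem a ha
    have h2 := hdsmem b hb
    omega
  have hlt' : ∀ k ∈ ds.map Int.toNat, k < stA.1.length := by
    intro k hk
    obtain ⟨x, hx, hxk⟩ := List.mem_map.mp hk
    have h1 := hdsmem x hx
    rw [hlenA]
    omega
  rw [pvEraseIdx_foldl stA.1 (ds.map Int.toNat) hpair hlt', hlenA]
  rw [PySem.List.pyRange_one 0 (tl.length : Int),
      show (((tl.length : Int)) - 0).toNat = tl.length by omega, List.filterMap_map]
  apply List.filterMap_congr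
  intro k hk
  have hklt : k < tl.length := List.mem_range.mp hk
  simp only [Function.comp, zero_add]
  have htn : ((k : Int)).toNat = k := by omega
  have hmem_iff : (k ∈ ds.map Int.toNat) ↔ (k : Int) ∈ stA.2 := by
    constructor
    · intro hm
      obtain ⟨x, hx, hxk⟩ := List.mem_map.mp hm
      have h1 := hdsmem x hx
      have hx2 : x = (k : Int) := by omega
      rw [← hx2]
      exact (PySem.List.mem_sorted _ _ _ x).mp hx
    · intro hm
      refine List.mem_map.mpr ⟨(k : Int), (PySem.List.mem_sorted _ _ _ _).mpr hm, by omega⟩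
  have hal := halive k hklt
  by_cases hm : (k : Int) ∈ stA.2
  · rw [if_pos (hmem_iff.mpr hm)]
    rw [htn, hal]
    simp [hm]
  · rw [if_neg (fun hc => hm (hmem_iff.mp hc))]
    rw [htn, hal]
    simp only [hm, decide_false, Bool.not_false, if_true]
    have hk' : k < stA.1.length := by rw [hlenA]; exact hklt
    rw [List.getElem?_eq_getElem hk']
    congr 1
    have hgd : stA.1[k] = (PySem.List.pyGet? stA.1 (k : Int)).getD "" := by
      rw [show (PySem.List.pyGet? stA.1 (k : Int)).getD "" = PySem.List.pyGetD stA.1 (k : Int) "" from rfl,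
          PySem.List.pyGetD_eq_getElem _ _ (by omega) (by rw [hlenA]; exact_mod_cast hklt)]
      simp
    rw [hgd]
    exact hval (k : Int) (by omega) (by exact_mod_cast hklt)
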